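-- pv_equiv track=rewrite | github.com/etblink/Nested-Fibrational-Cosmology | ladder_certificate_v2.py | is_q3
-- ===== SOURCE A (Python) =====
-- from collections import defaultdict, Counter
--
-- def is_q3(graph_edges, vertices):
--     if len(vertices) != 8: return False
--     verts = sorted(vertices); sub_adj = defaultdict(set); ec = 0
--     for e in graph_edges:
--         if e.issubset(vertices):
--             u,v = list(e); sub_adj[u].add(v); sub_adj[v].add(u); ec += 1
--     if ec != 12: return False
--     if not all(len(sub_adj[v]) == 3 for v in verts): return False
--     color = {}; queue = [verts[0]]; color[verts[0]] = 0
--     while queue: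
--         v = queue.pop(0)
--         for u in sub_adj[v]:
--             if u not in color: color[u] = 1 - color[v]; queue.append(u)
--             elif color[u] == color[v]: return False
--     if len(color) != 8: return False
--     for v in verts:
--         for u in sub_adj[v]:
--             if sub_adj[v] & sub_adj[u]: return False
--     return True
-- ===== SOURCE B (Python) =====
-- def is_q3(graph_edges, vertices):
--     if len(vertices) != 8:
--         return False
--     vs = sorted(vertices)
--     sub = [e for e in graph_edges if e.issubset(vertices)]
--     if len(sub) != 12:
--         return False
--     adj = {v: set() for v in vs}
--     for e in sub:
--         u, v = list(e)
--         adj[u].add(v)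
--         adj[v].add(u)
--     if any(len(adj[v]) != 3 for v in vs):
--         return False
--     # connected + bipartite <=> exactly ONE proper 2-coloring with color[vs[0]] == 0:
--     # enumerate all 2^7 anchored colorings and count the proper ones.
--     assignments = [[]]
--     for _ in range(7):
--         assignments = [bits + [b] for bits in assignments for b in (0, 1)]
--     good = 0
--     for bits in assignments:
--         color = dict(zip(vs, [0] + bits))
--         if all(color[u] != color[v] for v in vs for u in adj[v]):
--             good += 1
--     if good != 1:
--         return False
--     return all(not (adj[v] & adj[u]) for v in vs for u in adj[v])
-- ===== Notes on version B (the rewrite author's own statement) =====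
-- stated objective: alternative
-- what changed: B keeps the edge-filter, edge-count and 3-regularity guards but replaces A's BFS 2-coloring + connectivity check by exhaustively counting the anchored proper 2-colorings among all 2^7 candidates (exactly one exists iff the 8-vertex subgraph is connected and bipartite), keeping the final common-neighbor check.
import Mathlib
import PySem

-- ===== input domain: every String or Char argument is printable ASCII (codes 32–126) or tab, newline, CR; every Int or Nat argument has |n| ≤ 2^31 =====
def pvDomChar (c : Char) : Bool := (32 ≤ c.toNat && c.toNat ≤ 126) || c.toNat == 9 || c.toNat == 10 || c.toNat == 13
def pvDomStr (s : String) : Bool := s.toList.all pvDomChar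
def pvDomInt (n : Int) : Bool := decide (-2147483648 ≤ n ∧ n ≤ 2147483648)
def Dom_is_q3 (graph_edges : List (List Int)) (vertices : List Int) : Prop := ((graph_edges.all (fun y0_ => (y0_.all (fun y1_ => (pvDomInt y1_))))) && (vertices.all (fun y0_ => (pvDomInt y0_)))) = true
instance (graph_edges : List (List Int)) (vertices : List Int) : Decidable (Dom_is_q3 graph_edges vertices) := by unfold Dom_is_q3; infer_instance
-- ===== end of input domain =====

-- B replaces A's BFS 2-coloring + connectivity test by counting the anchored proper
-- 2-colorings among all 2^7 candidates (exactly one iff connected and bipartite); same result, 'alternative' objective.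
-- Python note: edges/vertices are Python sets; all set iteration in A is consumed order-independently.

-- ===== PORT A =====
-- inner 'for u in sub_adj[v]' of the BFS while-loop
def q3ScanA (v : Int) :
    List Int → List Int → PySem.Dict Int Int → Option (List Int × PySem.Dict Int Int)
  | [], queue, color => some (queue, color)
  | u :: rest, queue, color =>
    match color.get? u with
    | none => q3ScanA v rest (queue ++ [u]) (color.insert u (1 - color.getD v 0))
    | some cu => if cu = color.getD v 0 then none else q3ScanA v rest queue color
-- the 'while queue:' loop; fuel = number of vertices: each iteration pops one queued vertex and
-- every vertex is enqueued at most once (proved below), so the fuel-exhaustion arm is never taken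
-- on inputs admitted by Pre_; 'color.getD v 0' stands for Python's color[v] (v is always a key).
def q3BfsA (adj : PySem.Dict Int (PySem.Set Int)) :
    Nat → List Int → PySem.Dict Int Int → Option (PySem.Dict Int Int)
  | _, [], color => some color
  | 0, _ :: _, color => some color
  | fuel + 1, v :: queue, color =>
    match q3ScanA v (adj.getD v []) queue color with
    | none => none
    | some (queue', color') => q3BfsA adj fuel queue' color'

def is_q3 (graph_edges : List (List Int)) (vertices : List Int) : Bool :=
  if vertices.length ≠ 8 then false else
  let verts := PySem.List.sorted vertices (fun x => x) false
  let st := graph_edges.foldl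
    (fun (st : PySem.Dict Int (PySem.Set Int) × Int) e =>
      if PySem.Set.issubset e vertices then
        match e with
        | [u, v] =>
          let d := st.1.insert u (PySem.Set.add (st.1.getD u []) v)
          (d.insert v (PySem.Set.add (d.getD v []) u), st.2 + 1)
        | _ => st   -- Python raises ValueError here ('u,v = list(e)'); excluded by Pre_is_q3
      else st) (PySem.Dict.empty, (0 : Int))
  let subAdj := st.1
  if st.2 ≠ 12 then false else
  if ¬ (verts.all fun v => (subAdj.getD v []).length == 3) then false else
  let v0 := PySem.List.pyGetD verts 0 0
  match q3BfsA subAdj vertices.length [v0] (PySem.Dict.empty.insert v0 0) with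
  | none => false
  | some color =>
    if color.size ≠ 8 then false else
    verts.all fun v => (subAdj.getD v []).all fun u =>
      PySem.Set.inter (subAdj.getD v []) (subAdj.getD u []) == ([] : List Int)

-- ===== PORT B =====
def is_q3_alt (graph_edges : List (List Int)) (vertices : List Int) : Bool :=
  if vertices.length ≠ 8 then false else
  let vs := PySem.List.sorted vertices (fun x => x) false
  let sub := graph_edges.filter (fun e => PySem.Set.issubset e vertices)
  if sub.length ≠ 12 then false else
  let adj0 := vs.foldl (fun (d : PySem.Dict Int (PySem.Set Int)) v => d.insert v []) PySem.Dict.empty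
  let adj := sub.foldl
    (fun d e =>
      -- 'u, v = list(e)': exact for the 2-element edge-sets Pre_is_q3 admits
      let u := PySem.List.pyGetD e 0 0
      let v := PySem.List.pyGetD e 1 0
      let d1 := d.insert u (PySem.Set.add (d.getD u []) v)
      d1.insert v (PySem.Set.add (d1.getD v []) u)) adj0
  if vs.any (fun v => (adj.getD v []).length ≠ 3) then false else
  let assignments : List (List Int) := (List.range 7).foldl
    (fun acc _ => acc.flatMap (fun bits => [bits ++ [0], bits ++ [1]])) [[]]
  let good : Int := assignments.foldl
    (fun g bits =>
      let color := PySem.Dict.ofList (vs.zip (0 :: bits))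
      if vs.all (fun v => (adj.getD v []).all fun u => color.getD u 0 ≠ color.getD v 0)
      then g + 1 else g) 0
  if good ≠ 1 then false else
  vs.all fun v => (adj.getD v []).all fun u =>
    PySem.Set.inter (adj.getD v []) (adj.getD u []) == ([] : List Int)

-- ===== PRECONDITION & SPEC =====
-- The Nodup clauses are the set-encoding invariant (Python sets cannot hold duplicates); the last
-- clause excludes exactly the inputs where Python A raises ValueError unpacking 'u, v = list(e)'
-- (a subgraph edge-set with ≠ 2 elements; when len(vertices) ≠ 8 A returns before the loop).
def Pre_is_q3 (graph_edges : List (List Int)) (vertices : List Int) : Prop :=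
  vertices.Nodup ∧ (∀ e ∈ graph_edges, e.Nodup) ∧
  (vertices.length = 8 → ∀ e ∈ graph_edges, (∀ x ∈ e, x ∈ vertices) → e.length = 2)
instance (graph_edges : List (List Int)) (vertices : List Int) : Decidable (Pre_is_q3 graph_edges vertices) := by unfold Pre_is_q3; infer_instance

def pvWitness_is_q3 : List (List Int) × List Int :=
  ([[0,1],[0,2],[0,4],[1,3],[1,5],[2,3],[2,6],[3,7],[4,5],[4,6],[5,7],[6,7]],
   [0,1,2,3,4,5,6,7])

def Spec_is_q3 (graph_edges : List (List Int)) (vertices : List Int) (out : Bool) : Prop := out = is_q3_alt graph_edges vertices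
instance (graph_edges : List (List Int)) (vertices : List Int) (out : Bool) : Decidable (Spec_is_q3 graph_edges vertices out) := by unfold Spec_is_q3; infer_instance

-- ===== CLAIM (what is proved, stated in full; the proofs are below) =====
def Claim_equal_is_q3 : Prop := ∀ (graph_edges : List (List Int)) (vertices : List Int), Dom_is_q3 graph_edges vertices → Pre_is_q3 graph_edges vertices → Spec_is_q3 graph_edges vertices (is_q3 graph_edges vertices)

-- ===== LEMMAS AND PROOFS =====

-- an anchored proper 2-coloring of the 8-vertex subgraph, as a total function on ℤ
def q3PrC (vs : List Int) (v0 : Int) (N : Int → List Int) (c : Int → Int) : Prop :=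
  c v0 = 0 ∧ (∀ x ∈ vs, c x = 0 ∨ c x = 1) ∧ ∀ v ∈ vs, ∀ u ∈ N v, c u ≠ c v

-- the BFS loop invariant
def q3Inv (vs : List Int) (v0 : Int) (N : Int → List Int)
    (queue : List Int) (color : PySem.Dict Int Int) : Prop :=
  color.keys.Nodup ∧ queue.Nodup ∧ (∀ k ∈ queue, k ∈ color.keys) ∧
  (∀ k ∈ color.keys, k ∈ vs) ∧ v0 ∈ color.keys ∧ color.getD v0 0 = 0 ∧
  (∀ k ∈ color.keys, color.getD k 0 = 0 ∨ color.getD k 0 = 1) ∧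
  (∀ k ∈ color.keys, k ∉ queue → ∀ u ∈ N k, u ∈ color.keys ∧ color.getD u 0 ≠ color.getD k 0) ∧
  (∀ c, q3PrC vs v0 N c → ∀ k ∈ color.keys, c k = color.getD k 0)

-- all 0/1-lists of length n, in B's enumeration order
def q3Combos : Nat → List (List Int)
  | 0 => [[]]
  | n + 1 => (q3Combos n).flatMap (fun bits => [bits ++ [0], bits ++ [1]])

-- B's per-candidate properness test, exactly as the port writes it
def q3Pb (adj : PySem.Dict Int (PySem.Set Int)) (vs : List Int) (bits : List Int) : Bool :=
  let color := PySem.Dict.ofList (vs.zip (0 :: bits))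
  vs.all (fun v => (adj.getD v []).all fun u => color.getD u 0 ≠ color.getD v 0)

def q3AdjStep (d : PySem.Dict Int (PySem.Set Int)) (e : List Int) :
    PySem.Dict Int (PySem.Set Int) :=
  match e with
  | [u, v] =>
    let d1 := d.insert u (PySem.Set.add (d.getD u []) v)
    d1.insert v (PySem.Set.add (d1.getD v []) u)
  | _ => d


lemma range_foldl_combos (n : Nat) :
    (List.range n).foldl (fun acc _ => acc.flatMap (fun bits => [bits ++ [0], bits ++ [1]])) [[]]
      = q3Combos n := by
  induction n with
  | zero => rfl
  | succ n ih => rw [List.range_succ, List.foldl_append, ih]; rfl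

lemma mem_combos (n : Nat) (bits : List Int) :
    bits ∈ q3Combos n ↔ bits.length = n ∧ ∀ b ∈ bits, b = 0 ∨ b = 1 := by
  induction n generalizing bits with
  | zero => simp [q3Combos, List.length_eq_zero_iff]; rintro rfl; simp
  | succ n ih =>
    simp only [q3Combos, List.mem_flatMap]
    constructor
    · rintro ⟨t, ht, h⟩
      rcases (ih t).1 ht with ⟨hl, hb⟩
      simp only [List.mem_cons] at h
      rcases h with rfl | h
      · constructor
        · simp [hl]
        · intro b hb'; rcases List.mem_append.1 hb' with h' | h'
          · exact hb b h'
          · simp at h'; omega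
      · simp only [List.not_mem_nil, or_false] at h; subst h
        constructor
        · simp [hl]
        · intro b hb'; rcases List.mem_append.1 hb' with h' | h'
          · exact hb b h'
          · simp at h'; omega
    · rintro ⟨hl, hb⟩
      have hne : bits ≠ [] := by intro h; subst h; simp at hl
      refine ⟨bits.dropLast, (ih _).2 ⟨by simp [hl], ?_⟩, ?_⟩
      · intro b hb'; exact hb b (List.dropLast_subset _ hb')
      · have hlast := List.dropLast_append_getLast hne
        rcases hb _ (List.getLast_mem hne) with h0 | h1
        · simp only [List.mem_cons]; left
          conv_lhs => rw [← hlast]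
          rw [h0]
        · simp only [List.mem_cons]; right; left
          conv_lhs => rw [← hlast]
          rw [h1]

lemma nodup_combos (n : Nat) : (q3Combos n).Nodup := by
  induction n with
  | zero => simp [q3Combos]
  | succ n ih =>
    rw [q3Combos, List.nodup_flatMap]
    constructor
    · intro t _; simp
    · apply List.Pairwise.imp ?_ (ih.pairwise_of_forall_ne (fun a _ b _ h => h))
      intro a b hne
      simp only [Function.onFun, List.disjoint_left]
      intro x hx hx'
      simp only [List.mem_cons, List.not_mem_nil, or_false] at hx hx'
      rcases hx with rfl | rfl <;> rcases hx' with h | h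
      · exact hne (List.append_inj_left' h rfl)
      · have := congrArg (fun l => l.getLast?) h; simp at this
      · have := congrArg (fun l => l.getLast?) h; simp at this
      · exact hne (List.append_inj_left' h rfl)

lemma countP_eq_one_iff {α : Type} (l : List α) (p : α → Bool) (hnd : l.Nodup) :
    l.countP p = 1 ↔ ∃ a ∈ l, p a = true ∧ ∀ b ∈ l, p b = true → b = a := by
  induction l with
  | nil => simp
  | cons x xs ih =>
    rw [List.countP_cons]
    rcases List.nodup_cons.1 hnd with ⟨hx, hxs⟩
    by_cases hp : p x
    · simp only [hp, if_true]
      constructor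
      · intro h
        have h0 : xs.countP p = 0 := by omega
        refine ⟨x, List.mem_cons_self, hp, ?_⟩
        intro b hb hpb
        rcases List.mem_cons.1 hb with rfl | hb'
        · rfl
        · exact absurd (List.countP_eq_zero.1 h0 b hb') (by simp [hpb])
      · rintro ⟨a, ha, hpa, hu⟩
        rcases List.mem_cons.1 ha with rfl | ha'
        · have h0 : xs.countP p = 0 := by
            apply List.countP_eq_zero.2
            intro b hb hpb
            have h2 := hu b (List.mem_cons_of_mem _ hb) hpb
            rw [h2] at hb; exact hx hb
          omega
        · exfalso
          have h2 := hu x List.mem_cons_self hp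
          rw [← h2] at ha'; exact hx ha'
    · rw [if_neg hp, Nat.add_zero, ih hxs]
      constructor
      · rintro ⟨a, ha, hpa, hu⟩
        exact ⟨a, List.mem_cons_of_mem _ ha, hpa, fun b hb hpb => by
          rcases List.mem_cons.1 hb with rfl | hb'
          · exact absurd hpb hp
          · exact hu b hb' hpb⟩
      · rintro ⟨a, ha, hpa, hu⟩
        rcases List.mem_cons.1 ha with rfl | ha'
        · exact absurd hpa hp
        · exact ⟨a, ha', hpa, fun b hb hpb => hu b (List.mem_cons_of_mem _ hb) hpb⟩

lemma getD_update_of_not_mem (d : PySem.Dict Int Int) (ps : List (Int × Int)) (k : Int)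
    (h : ∀ p ∈ ps, p.1 ≠ k) : (d.update ps).getD k 0 = d.getD k 0 := by
  induction ps generalizing d with
  | nil => rfl
  | cons p ps ih =>
    have h1 : (d.insert p.1 p.2).getD k 0 = d.getD k 0 := by
      rw [PySem.Dict.getD_insert, if_neg]
      exact fun hk => h p (List.mem_cons_self) (by rw [hk])
    calc (d.update (p :: ps)).getD k 0
        = ((d.insert p.1 p.2).update ps).getD k 0 := rfl
      _ = (d.insert p.1 p.2).getD k 0 := ih _ (fun q hq => h q (List.mem_cons_of_mem _ hq))
      _ = d.getD k 0 := h1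

lemma getD_update_zip (d : PySem.Dict Int Int) (ks vls : List Int) (hnd : ks.Nodup)
    (k w : Int) (hmem : (k, w) ∈ ks.zip vls) :
    (d.update (ks.zip vls)).getD k 0 = w := by
  induction ks generalizing d vls with
  | nil => simp at hmem
  | cons k0 ks ih =>
    cases vls with
    | nil => simp at hmem
    | cons v0 vls =>
      rcases List.nodup_cons.1 hnd with ⟨hk0, hks⟩
      simp only [List.zip_cons_cons, List.mem_cons] at hmem
      rcases hmem with heq | hmem'
      · injection heq with h1 h2
        subst h1; subst h2
        have h3 : ((d.insert k w).update (ks.zip vls)).getD k 0 = (d.insert k w).getD k 0 := by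
          apply getD_update_of_not_mem
          intro p hp hpk
          exact hk0 (hpk ▸ (List.of_mem_zip hp).1)
        calc (d.update ((k, w) :: ks.zip vls)).getD k 0
            = ((d.insert k w).update (ks.zip vls)).getD k 0 := rfl
          _ = (d.insert k w).getD k 0 := h3
          _ = w := PySem.Dict.getD_insert_self _ _ _ _
      · exact ih _ _ hks hmem'

lemma getD_zipDict (ks vls : List Int) (hnd : ks.Nodup) (k w : Int)
    (hmem : (k, w) ∈ ks.zip vls) :
    (PySem.Dict.ofList (ks.zip vls)).getD k 0 = w :=
  getD_update_zip _ _ _ hnd _ _ hmem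

lemma zipDict_map_tail (v0 : Int) (tl bits : List Int) (hnd : (v0 :: tl).Nodup)
    (hlen : tl.length = bits.length) :
    tl.map (fun u => (PySem.Dict.ofList ((v0 :: tl).zip (0 :: bits))).getD u 0) = bits := by
  apply List.ext_getElem
  · simp [hlen]
  · intro i h1 h2
    simp only [List.getElem_map]
    apply getD_zipDict _ _ hnd
    simp only [List.zip_cons_cons, List.mem_cons]
    right
    have hz : i < (tl.zip bits).length := by rw [List.length_zip]; simp at h1; omega
    have hmem2 := List.getElem_mem hz
    rw [List.getElem_zip] at hmem2
    exact hmem2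

lemma q3AdjStep_getD (d : PySem.Dict Int (PySem.Set Int)) (u v x : Int) (huv : u ≠ v) :
    (q3AdjStep d [u, v]).getD x []
      = if x = v then PySem.Set.add (d.getD v []) u
        else if x = u then PySem.Set.add (d.getD u []) v
        else d.getD x [] := by
  simp only [q3AdjStep, PySem.Dict.getD_insert]
  rw [if_neg (Ne.symm huv)]

lemma foldl_pair_split (l : List (List Int)) (p : List Int → Bool)
    (d0 : PySem.Dict Int (PySem.Set Int)) (c0 : Int) :
    l.foldl (fun st e => if p e then (q3AdjStep st.1 e, st.2 + 1) else st) (d0, c0)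
      = ((l.filter p).foldl q3AdjStep d0, c0 + ((l.filter p).length : Int)) := by
  induction l generalizing d0 c0 with
  | nil => simp
  | cons e l ih =>
    by_cases hp : p e
    · simp only [List.foldl_cons, List.filter_cons, hp, if_true, ih]
      simp [List.length_cons]; ring
    · simp only [List.foldl_cons, List.filter_cons, hp, ih]
      simp

lemma foldl_adj_pointwise (l : List (List Int)) (d1 d2 : PySem.Dict Int (PySem.Set Int))
    (h : ∀ x, d1.getD x [] = d2.getD x []) :
    ∀ x, (l.foldl q3AdjStep d1).getD x [] = (l.foldl q3AdjStep d2).getD x [] := by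
  induction l generalizing d1 d2 with
  | nil => exact h
  | cons e l ih =>
    apply ih
    intro x
    match e with
    | [] => exact h x
    | [a] => exact h x
    | a :: b :: c :: r => exact h x
    | [u, v] =>
      by_cases huv : u = v
      · subst huv
        simp only [q3AdjStep, PySem.Dict.getD_insert]
        split_ifs with h1 <;> simp [h]
      · rw [q3AdjStep_getD _ _ _ _ huv, q3AdjStep_getD _ _ _ _ huv]
        split_ifs <;> simp [h]

lemma adj0_getD (vs : List Int) (d : PySem.Dict Int (PySem.Set Int))
    (hd : ∀ x, d.getD x [] = []) :
    ∀ x, (vs.foldl (fun d v => d.insert v ([] : PySem.Set Int)) d).getD x [] = [] := by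
  induction vs generalizing d with
  | nil => exact hd
  | cons v vs ih =>
    apply ih
    intro x
    rw [PySem.Dict.getD_insert]
    split_ifs <;> simp [hd]

lemma adj_fold_sym (vertices : List Int) (l : List (List Int))
    (hl : ∀ e ∈ l, ∃ u v, e = [u, v] ∧ u ≠ v ∧ u ∈ vertices ∧ v ∈ vertices)
    (d : PySem.Dict Int (PySem.Set Int))
    (hd : ∀ x y, y ∈ d.getD x [] → x ∈ d.getD y [] ∧ x ∈ vertices ∧ y ∈ vertices) :
    ∀ x y, y ∈ (l.foldl q3AdjStep d).getD x [] →
      x ∈ (l.foldl q3AdjStep d).getD y [] ∧ x ∈ vertices ∧ y ∈ vertices := by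
  induction l generalizing d with
  | nil => exact hd
  | cons e l ih =>
    rcases hl e List.mem_cons_self with ⟨u, v, rfl, huv, hu, hv⟩
    simp only [List.foldl_cons]
    apply ih (fun e' he' => hl e' (List.mem_cons_of_mem _ he'))
    intro x y hy
    rw [q3AdjStep_getD _ _ _ _ huv] at hy
    have hmono : ∀ z w, w ∈ d.getD z [] → w ∈ (q3AdjStep d [u, v]).getD z [] := by
      intro z w hw
      rw [q3AdjStep_getD _ _ _ _ huv]
      split_ifs with h1 h2
      · subst h1; exact (PySem.Set.mem_add _ _ _).2 (Or.inl hw)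
      · subst h2; exact (PySem.Set.mem_add _ _ _).2 (Or.inl hw)
      · exact hw
    split_ifs at hy with h1 h2
    · subst h1
      rcases (PySem.Set.mem_add _ _ _).1 hy with hy' | rfl
      · rcases hd _ _ hy' with ⟨hxy, hx, hyv⟩
        exact ⟨hmono _ _ hxy, hx, hyv⟩
      · refine ⟨?_, hv, hu⟩
        rw [q3AdjStep_getD _ _ _ _ huv, if_neg huv, if_pos rfl]
        exact (PySem.Set.mem_add _ _ _).2 (Or.inr rfl)
    · subst h2
      rcases (PySem.Set.mem_add _ _ _).1 hy with hy' | rfl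
      · rcases hd _ _ hy' with ⟨hxy, hx, hyv⟩
        exact ⟨hmono _ _ hxy, hx, hyv⟩
      · refine ⟨?_, hu, hv⟩
        rw [q3AdjStep_getD _ _ _ _ huv, if_pos rfl]
        exact (PySem.Set.mem_add _ _ _).2 (Or.inr rfl)
    · rcases hd _ _ hy with ⟨hxy, hx, hyv⟩
      exact ⟨hmono _ _ hxy, hx, hyv⟩

lemma q3scan_spec (vs : List Int) (v0 : Int) (N : Int → List Int)
    (hcl : ∀ x y, y ∈ N x → x ∈ vs ∧ y ∈ vs) (v : Int) :
    ∀ (us queue : List Int) (color : PySem.Dict Int Int),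
    (∀ u ∈ us, u ∈ N v) →
    color.keys.Nodup →
    (∀ k ∈ color.keys, k ∈ vs) →
    v ∈ color.keys →
    (∀ k ∈ color.keys, color.getD k 0 = 0 ∨ color.getD k 0 = 1) →
    (∀ c, q3PrC vs v0 N c → ∀ k ∈ color.keys, c k = color.getD k 0) →
    (q3ScanA v us queue color = none → ∀ c, ¬ q3PrC vs v0 N c) ∧
    (∀ q' col', q3ScanA v us queue color = some (q', col') →
      ∃ new, q' = queue ++ new ∧ col'.keys = color.keys ++ new ∧ new.Nodup ∧
        (∀ u ∈ new, u ∉ color.keys ∧ u ∈ N v) ∧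
        (∀ k ∈ color.keys, col'.getD k 0 = color.getD k 0) ∧
        (∀ u ∈ us, u ∈ col'.keys ∧ col'.getD u 0 ≠ col'.getD v 0) ∧
        (∀ k ∈ col'.keys, col'.getD k 0 = 0 ∨ col'.getD k 0 = 1) ∧
        (∀ c, q3PrC vs v0 N c → ∀ k ∈ col'.keys, c k = col'.getD k 0)) := by
  intro us
  induction us with
  | nil =>
    intro queue color hus hknd hkvs hv hbin hforce
    constructor
    · intro h; simp [q3ScanA] at h
    · intro q' col' h
      simp only [q3ScanA, Option.some.injEq, Prod.mk.injEq] at h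
      obtain ⟨rfl, rfl⟩ := h
      exact ⟨[], by simp, by simp, List.nodup_nil, by simp, fun k _ => rfl, by simp,
        hbin, hforce⟩
  | cons u rest ih =>
    intro queue color hus hknd hkvs hv hbin hforce
    have huNv : u ∈ N v := hus u List.mem_cons_self
    have hvvs : v ∈ vs := hkvs v hv
    have huvs : u ∈ vs := (hcl v u huNv).2
    have hbv := hbin v hv
    cases hgu : color.get? u with
    | none =>
      have hucont : color.contains u = false := (PySem.Dict.get?_eq_none_iff_contains _ _).1 hgu
      have hunk : u ∉ color.keys := by
        intro h
        rw [(PySem.Dict.contains_iff_mem_keys _ _).2 h] at hucont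
        simp at hucont
      have hvu : v ≠ u := by
        intro h; rw [← h] at hunk; exact hunk hv
      set cv := color.getD v 0 with hcv
      set col1 := color.insert u (1 - cv) with hcol1
      have hkeys1 : col1.keys = color.keys ++ [u] :=
        PySem.Dict.keys_insert_of_not_contains _ _ hucont
      have hpres1 : ∀ k ∈ color.keys, col1.getD k 0 = color.getD k 0 := by
        intro k hk
        rw [hcol1, PySem.Dict.getD_insert, if_neg (fun h => hunk (by rw [← h]; exact hk))]
      have hu1 : col1.getD u 0 = 1 - cv := PySem.Dict.getD_insert_self _ _ _ _
      have hv1 : col1.getD v 0 = cv := hpres1 v hv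
      have hstep : q3ScanA v (u :: rest) queue color
          = q3ScanA v rest (queue ++ [u]) col1 := by
        rw [hcol1, hcv]
        simp only [q3ScanA, hgu]
      have hknd1 : col1.keys.Nodup := by
        rw [hkeys1]
        simp only [List.nodup_append, List.nodup_singleton, true_and]
        refine ⟨hknd, ?_⟩
        intro a ha b hb
        have : b = u := by simpa using hb
        rw [this]
        intro h; rw [h] at ha; exact hunk ha
      have hkvs1 : ∀ k ∈ col1.keys, k ∈ vs := by
        intro k hk
        rw [hkeys1] at hk
        rcases List.mem_append.1 hk with h | h
        · exact hkvs k h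
        · simp at h; exact h ▸ huvs
      have hvmem1 : v ∈ col1.keys := by rw [hkeys1]; exact List.mem_append_left _ hv
      have hbin1 : ∀ k ∈ col1.keys, col1.getD k 0 = 0 ∨ col1.getD k 0 = 1 := by
        intro k hk
        rw [hkeys1] at hk
        rcases List.mem_append.1 hk with h | h
        · rw [hpres1 k h]; exact hbin k h
        · have hk2 : k = u := by simpa using h
          rw [hk2, hu1]; omega
      have hforce1 : ∀ c, q3PrC vs v0 N c → ∀ k ∈ col1.keys, c k = col1.getD k 0 := by
        intro c hprc k hk
        rw [hkeys1] at hk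
        rcases List.mem_append.1 hk with h | h
        · rw [hpres1 k h]; exact hforce c hprc k h
        · have hk2 : k = u := by simpa using h
          rw [hk2, hu1]
          have h1 : c u ≠ c v := hprc.2.2 v hvvs u huNv
          have h2 : c v = cv := hforce c hprc v hv
          have h3 := hprc.2.1 u huvs
          have h4 := hprc.2.1 v hvvs
          omega
      obtain ⟨ihnone, ihsome⟩ := ih (queue ++ [u]) col1
        (fun x hx => hus x (List.mem_cons_of_mem _ hx)) hknd1 hkvs1 hvmem1 hbin1 hforce1
      constructor
      · intro h; rw [hstep] at h; exact ihnone h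
      · intro q' col' h
        rw [hstep] at h
        obtain ⟨new', h1, h2, h3, h4, h5, h6, h7, h8⟩ := ihsome q' col' h
        have hsubk : ∀ k ∈ color.keys, k ∈ col1.keys := by
          intro k hk; rw [hkeys1]; exact List.mem_append_left _ hk
        refine ⟨u :: new', ?_, ?_, ?_, ?_, ?_, ?_, h7, h8⟩
        · rw [h1, List.append_assoc]; rfl
        · rw [h2, hkeys1, List.append_assoc]; rfl
        · rw [List.nodup_cons]
          exact ⟨fun hun => (h4 u hun).1 (by rw [hkeys1]; exact List.mem_append_right _ (by simp)), h3⟩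
        · intro x hx
          rcases List.mem_cons.1 hx with rfl | hx'
          · exact ⟨hunk, huNv⟩
          · exact ⟨fun hk => (h4 x hx').1 (hsubk x hk), (h4 x hx').2⟩
        · intro k hk
          rw [h5 k (hsubk k hk), hpres1 k hk]
        · intro x hx
          rcases List.mem_cons.1 hx with rfl | hx'
          · refine ⟨?_, ?_⟩
            · rw [h2, hkeys1]
              exact List.mem_append_left _ (List.mem_append_right _ (by simp))
            · have hxk : x ∈ col1.keys := by
                rw [hkeys1]; exact List.mem_append_right _ (by simp)
              rw [h5 x hxk, h5 v hvmem1, hu1, hv1]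
              omega
          · exact h6 x hx'
    | some cu =>
      have hukeys : u ∈ color.keys := by
        rw [← PySem.Dict.contains_iff_mem_keys]
        by_contra hc
        rw [Bool.not_eq_true] at hc
        rw [(PySem.Dict.get?_eq_none_iff_contains _ _).2 hc] at hgu
        simp at hgu
      have hgetDu : color.getD u 0 = cu := by
        rw [PySem.Dict.getD_eq_get?_getD, hgu]; rfl
      by_cases hc : cu = color.getD v 0
      · have hstep : q3ScanA v (u :: rest) queue color = none := by
          simp only [q3ScanA, hgu, if_pos hc]
        constructor
        · intro _ c hprc
          have h1 : c u = c v := by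
            rw [hforce c hprc u hukeys, hforce c hprc v hv, hgetDu, hc]
          exact hprc.2.2 v hvvs u huNv h1
        · intro q' col' h; rw [hstep] at h; simp at h
      · have hstep : q3ScanA v (u :: rest) queue color = q3ScanA v rest queue color := by
          simp only [q3ScanA, hgu, if_neg hc]
        obtain ⟨ihnone, ihsome⟩ := ih queue color
          (fun x hx => hus x (List.mem_cons_of_mem _ hx)) hknd hkvs hv hbin hforce
        constructor
        · intro h; rw [hstep] at h; exact ihnone h
        · intro q' col' h
          rw [hstep] at h
          obtain ⟨new', h1, h2, h3, h4, h5, h6, h7, h8⟩ := ihsome q' col' h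
          refine ⟨new', h1, h2, h3, h4, h5, ?_, h7, h8⟩
          intro x hx
          rcases List.mem_cons.1 hx with rfl | hx'
          · refine ⟨by rw [h2]; exact List.mem_append_left _ hukeys, ?_⟩
            rw [h5 x hukeys, h5 v hv, hgetDu]
            exact hc
          · exact h6 x hx'

lemma q3loop_spec (adj : PySem.Dict Int (PySem.Set Int)) (vs : List Int) (v0 : Int)
    (hcl : ∀ x y, y ∈ adj.getD x [] → x ∈ vs ∧ y ∈ vs) (hlen : vs.length = 8) :
    ∀ (fuel : Nat) (queue : List Int) (color : PySem.Dict Int Int),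
      q3Inv vs v0 (fun x => adj.getD x []) queue color →
      queue.length + 8 ≤ fuel + color.keys.length →
      (q3BfsA adj fuel queue color = none → ∀ c, ¬ q3PrC vs v0 (fun x => adj.getD x []) c) ∧
      (∀ col', q3BfsA adj fuel queue color = some col' →
        q3Inv vs v0 (fun x => adj.getD x []) [] col') := by
  intro fuel
  induction fuel with
  | zero =>
    intro queue color hinv hfuel
    have hkle : color.keys.length ≤ 8 := by
      have := (List.subperm_of_subset hinv.1 (fun k hk => hinv.2.2.2.1 k hk)).length_le
      omega
    have hq : queue = [] := by
      have : queue.length = 0 := by omega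
      exact List.length_eq_zero_iff.1 this
    subst hq
    constructor
    · intro h; simp [q3BfsA] at h
    · intro col' h
      simp only [q3BfsA, Option.some.injEq] at h
      subst h
      exact hinv
  | succ fuel ih =>
    intro queue color hinv hfuel
    match queue with
    | [] =>
      constructor
      · intro h; simp [q3BfsA] at h
      · intro col' h
        simp only [q3BfsA, Option.some.injEq] at h
        subst h
        exact hinv
    | v :: rest =>
      obtain ⟨hknd, hqnd, hqk, hkvs, hv0, hc0, hbin, hclosed, hforce⟩ := hinv
      have hv : v ∈ color.keys := hqk v List.mem_cons_self
      have hvrest : v ∉ rest := (List.nodup_cons.1 hqnd).1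
      obtain ⟨scnone, scsome⟩ := q3scan_spec vs v0 _ hcl v (adj.getD v []) rest color
        (fun u hu => hu) hknd hkvs hv hbin hforce
      constructor
      · intro h
        cases hsc : q3ScanA v (adj.getD v []) rest color with
        | none => exact scnone hsc
        | some pr =>
          rw [q3BfsA, hsc] at h
          obtain ⟨new, h1, h2, h3, h4, h5, h6, h7, h8⟩ := scsome pr.1 pr.2 (by rw [hsc])
          have hnewdisj : ∀ x ∈ new, x ∉ color.keys := fun x hx => (h4 x hx).1
          refine (ih pr.1 pr.2 ⟨?_, ?_, ?_, ?_, ?_, ?_, h7, ?_, h8⟩ ?_).1 h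
          · rw [h2]
            rw [List.nodup_append]
            exact ⟨hknd, h3, fun a ha b hb => fun he => hnewdisj b hb (he ▸ ha)⟩
          · rw [h1, List.nodup_append]
            refine ⟨(List.nodup_cons.1 hqnd).2, h3, ?_⟩
            intro a ha b hb he
            exact hnewdisj b hb (he ▸ (hqk a (List.mem_cons_of_mem _ ha)))
          · intro k hk
            rw [h1] at hk
            rw [h2]
            rcases List.mem_append.1 hk with h' | h'
            · exact List.mem_append_left _ (hqk k (List.mem_cons_of_mem _ h'))
            · exact List.mem_append_right _ h'
          · intro k hk
            rw [h2] at hk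
            rcases List.mem_append.1 hk with h' | h'
            · exact hkvs k h'
            · exact (hcl v k (h4 k h').2).2
          · rw [h2]; exact List.mem_append_left _ hv0
          · rw [h5 v0 hv0]; exact hc0
          · -- closedness
            intro k hk hkq
            rw [h2] at hk
            rw [h1] at hkq
            rcases List.mem_append.1 hk with hkold | hknew
            · by_cases hkv : k = v
              · subst hkv
                intro u hu
                exact h6 u hu
              · have hkrest : k ∉ rest := fun h' => hkq (List.mem_append_left _ h')
                have := hclosed k hkold (by
                  intro h'
                  rcases List.mem_cons.1 h' with h'' | h''
                  · exact hkv h''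
                  · exact hkrest h'')
                intro u hu
                obtain ⟨hu1, hu2⟩ := this u hu
                refine ⟨by rw [h2]; exact List.mem_append_left _ hu1, ?_⟩
                rw [h5 u hu1, h5 k hkold]
                exact hu2
            · exact absurd (List.mem_append_right rest hknew) hkq
          · -- fuel
            have h1l := congrArg List.length h1
            have h2l := congrArg List.length h2
            simp only [List.length_append, List.length_cons] at h1l h2l hfuel
            omega
      · intro col' h
        cases hsc : q3ScanA v (adj.getD v []) rest color with
        | none => rw [q3BfsA, hsc] at h; simp at h
        | some pr =>
          rw [q3BfsA, hsc] at h
          obtain ⟨new, h1, h2, h3, h4, h5, h6, h7, h8⟩ := scsome pr.1 pr.2 (by rw [hsc])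
          have hnewdisj : ∀ x ∈ new, x ∉ color.keys := fun x hx => (h4 x hx).1
          refine (ih pr.1 pr.2 ⟨?_, ?_, ?_, ?_, ?_, ?_, h7, ?_, h8⟩ ?_).2 col' h
          · rw [h2]
            rw [List.nodup_append]
            exact ⟨hknd, h3, fun a ha b hb => fun he => hnewdisj b hb (he ▸ ha)⟩
          · rw [h1, List.nodup_append]
            refine ⟨(List.nodup_cons.1 hqnd).2, h3, ?_⟩
            intro a ha b hb he
            exact hnewdisj b hb (he ▸ (hqk a (List.mem_cons_of_mem _ ha)))
          · intro k hk
            rw [h1] at hk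
            rw [h2]
            rcases List.mem_append.1 hk with h' | h'
            · exact List.mem_append_left _ (hqk k (List.mem_cons_of_mem _ h'))
            · exact List.mem_append_right _ h'
          · intro k hk
            rw [h2] at hk
            rcases List.mem_append.1 hk with h' | h'
            · exact hkvs k h'
            · exact (hcl v k (h4 k h').2).2
          · rw [h2]; exact List.mem_append_left _ hv0
          · rw [h5 v0 hv0]; exact hc0
          · intro k hk hkq
            rw [h2] at hk
            rw [h1] at hkq
            rcases List.mem_append.1 hk with hkold | hknew
            · by_cases hkv : k = v
              · subst hkv
                intro u hu
                exact h6 u hu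
              · have hkrest : k ∉ rest := fun h' => hkq (List.mem_append_left _ h')
                have := hclosed k hkold (by
                  intro h'
                  rcases List.mem_cons.1 h' with h'' | h''
                  · exact hkv h''
                  · exact hkrest h'')
                intro u hu
                obtain ⟨hu1, hu2⟩ := this u hu
                refine ⟨by rw [h2]; exact List.mem_append_left _ hu1, ?_⟩
                rw [h5 u hu1, h5 k hkold]
                exact hu2
            · exact absurd (List.mem_append_right rest hknew) hkq
          · have h1l := congrArg List.length h1
            have h2l := congrArg List.length h2
            simp only [List.length_append, List.length_cons] at h1l h2l hfuel
            omega

-- getD of the candidate dict at each vertex, when values come from a function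
lemma zipDict_getD_fun (v0 : Int) (tl : List Int) (hnd : (v0 :: tl).Nodup)
    (f : Int → Int) (hf0 : f v0 = 0) :
    ∀ x ∈ (v0 :: tl),
      (PySem.Dict.ofList ((v0 :: tl).zip (0 :: tl.map f))).getD x 0 = f x := by
  intro x hx
  rcases List.mem_iff_getElem.1 hx with ⟨i, hi, hxi⟩
  apply getD_zipDict _ _ hnd
  have hzl : i < ((v0 :: tl).zip (0 :: tl.map f)).length := by
    rw [List.length_zip]; simp; simp at hi; omega
  have hmem2 := List.getElem_mem hzl
  rw [List.getElem_zip] at hmem2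
  have hval : (0 :: tl.map f)[i]'(by simp; simp at hi; omega) = f ((v0 :: tl)[i]'hi) := by
    match i with
    | 0 => simpa using hf0.symm
    | j + 1 =>
      simp only [List.getElem_cons_succ, List.getElem_map]
  rw [hxi] at hmem2 hval
  rw [hval] at hmem2
  exact hmem2

lemma zipDict_binary (vs bits : List Int) (hnd : vs.Nodup)
    (hl : vs.length = bits.length + 1) (hb : ∀ b ∈ bits, b = 0 ∨ b = 1) :
    ∀ x ∈ vs, (PySem.Dict.ofList (vs.zip (0 :: bits))).getD x 0 = 0 ∨
              (PySem.Dict.ofList (vs.zip (0 :: bits))).getD x 0 = 1 := by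
  intro x hx
  rcases List.mem_iff_getElem.1 hx with ⟨i, hi, hxi⟩
  have hib : i < (0 :: bits).length := by simp; omega
  have hzl : i < (vs.zip (0 :: bits)).length := by rw [List.length_zip]; simp; omega
  have hmem2 := List.getElem_mem hzl
  rw [List.getElem_zip, hxi] at hmem2
  have heq := getD_zipDict vs (0 :: bits) hnd x ((0 :: bits)[i]'hib) hmem2
  rw [heq]
  have hv := List.getElem_mem hib
  rcases List.mem_cons.1 hv with h | h
  · left; exact h
  · exact hb _ h

lemma pb_iff (adj : PySem.Dict Int (PySem.Set Int)) (vs : List Int) (bits : List Int) :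
    q3Pb adj vs bits = true ↔
      (∀ v ∈ vs, ∀ u ∈ adj.getD v [],
        (PySem.Dict.ofList (vs.zip (0 :: bits))).getD u 0
          ≠ (PySem.Dict.ofList (vs.zip (0 :: bits))).getD v 0) := by
  simp [q3Pb, List.all_eq_true]

lemma q3core (adj : PySem.Dict Int (PySem.Set Int)) (vs : List Int) (v0 : Int) (tl : List Int)
    (hvs : vs = v0 :: tl) (hnd : vs.Nodup) (hlen : vs.length = 8)
    (hsym : ∀ x y, y ∈ adj.getD x [] → x ∈ adj.getD y [])
    (hcl : ∀ x y, y ∈ adj.getD x [] → x ∈ vs ∧ y ∈ vs) :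
    (∃ color, q3BfsA adj 8 [v0] (PySem.Dict.empty.insert v0 0) = some color ∧ color.size = 8)
      ↔ (q3Combos 7).countP (q3Pb adj vs) = 1 := by
  have htl : tl.length = 7 := by rw [hvs] at hlen; simpa using hlen
  have hv0vs : v0 ∈ vs := by rw [hvs]; exact List.mem_cons_self
  -- the initial state satisfies the invariant
  have hkeys0 : (PySem.Dict.empty.insert v0 (0 : Int)).keys = [v0] := by
    rw [PySem.Dict.keys_insert_of_not_contains _ _ (PySem.Dict.contains_empty _)]
    rfl
  have hc00 : (PySem.Dict.empty.insert v0 (0 : Int)).getD v0 0 = 0 :=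
    PySem.Dict.getD_insert_self _ _ _ _
  have hinv0 : q3Inv vs v0 (fun x => adj.getD x []) [v0] (PySem.Dict.empty.insert v0 0) := by
    refine ⟨by rw [hkeys0]; exact List.nodup_singleton _,
      List.nodup_singleton _,
      by rw [hkeys0]; exact fun k hk => hk,
      by rw [hkeys0]; intro k hk; rw [List.mem_singleton.1 hk]; exact hv0vs,
      by rw [hkeys0]; exact List.mem_singleton.2 rfl,
      hc00,
      by rw [hkeys0]; intro k hk; rw [List.mem_singleton.1 hk, hc00]; left; rfl,
      ?_, ?_⟩
    · rw [hkeys0]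
      intro k hk hkq
      exact absurd hk hkq
    · rw [hkeys0]
      intro c hprc k hk
      rw [List.mem_singleton.1 hk, hc00]
      exact hprc.1
  obtain ⟨loopnone, loopsome⟩ :=
    q3loop_spec adj vs v0 hcl hlen 8 [v0] (PySem.Dict.empty.insert v0 0) hinv0
      (by rw [hkeys0]; simp)
  constructor
  · rintro ⟨col', hbfs, hsize⟩
    have hinv := loopsome col' hbfs
    obtain ⟨hknd, -, -, hkvs, hv0k, hc0, hbin, hclosed, hforce⟩ := hinv
    have hklen : col'.keys.length = 8 := by
      have : col'.size = col'.items.length := rfl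
      simp only [PySem.Dict.keys, List.length_map]
      rw [← this, hsize]
    have hperm : col'.keys.Perm vs :=
      (List.subperm_of_subset hknd hkvs).perm_of_length_le (by omega)
    have hvsK : ∀ x ∈ vs, x ∈ col'.keys := fun x hx => hperm.mem_iff.2 hx
    set cstar := fun x => col'.getD x 0 with hcstar
    have hprcstar : q3PrC vs v0 (fun x => adj.getD x []) cstar :=
      ⟨hc0, fun x hx => hbin x (hvsK x hx),
        fun v hv u hu => (hclosed v (hvsK v hv) (List.not_mem_nil) u hu).2⟩
    set bitsS := tl.map cstar with hbitsS
    have hbitsSmem : bitsS ∈ q3Combos 7 := by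
      rw [mem_combos]
      constructor
      · rw [hbitsS, List.length_map]; exact htl
      · intro b hb
        rw [hbitsS] at hb
        rcases List.mem_map.1 hb with ⟨x, hx, rfl⟩
        exact hbin x (hvsK x (by rw [hvs]; exact List.mem_cons_of_mem _ hx))
    have hcolD : ∀ x ∈ vs,
        (PySem.Dict.ofList (vs.zip (0 :: bitsS))).getD x 0 = cstar x := by
      rw [hvs]
      rw [hvs] at hnd
      exact zipDict_getD_fun v0 tl hnd cstar hc0
    have hPbS : q3Pb adj vs bitsS = true := by
      rw [pb_iff]
      intro v hv u hu
      rw [hcolD v hv, hcolD u (hcl v u hu).2]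
      exact hprcstar.2.2 v hv u hu
    rw [countP_eq_one_iff _ _ (nodup_combos 7)]
    refine ⟨bitsS, hbitsSmem, hPbS, ?_⟩
    intro bits' hmem' hPb'
    obtain ⟨hlen', hbin'⟩ := mem_combos 7 bits' |>.1 hmem'
    set c' := fun u => (PySem.Dict.ofList (vs.zip (0 :: bits'))).getD u 0 with hc'
    have hanch' : c' v0 = 0 := by
      rw [hc']
      apply getD_zipDict _ _ hnd
      rw [hvs]
      exact List.mem_cons_self
    have hbinc' : ∀ x ∈ vs, c' x = 0 ∨ c' x = 1 :=
      zipDict_binary vs bits' hnd (by omega) hbin'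
    have hprc' : q3PrC vs v0 (fun x => adj.getD x []) c' :=
      ⟨hanch', hbinc', fun v hv u hu => by
        have := (pb_iff adj vs bits').1 hPb' v hv u hu
        exact this⟩
    have hforced' : ∀ x ∈ vs, c' x = cstar x := by
      intro x hx
      rw [hforce c' hprc' x (hvsK x hx)]
    have hrec : tl.map c' = bits' := by
      rw [hc']
      rw [hvs] at hnd ⊢
      exact zipDict_map_tail v0 tl bits' hnd (by omega)
    rw [← hrec, hbitsS]
    apply List.map_congr_left
    intro x hx
    exact hforced' x (by rw [hvs]; exact List.mem_cons_of_mem _ hx)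
  · intro hcount
    obtain ⟨bits1, hmem1, hPb1, huniq⟩ :=
      (countP_eq_one_iff _ _ (nodup_combos 7)).1 hcount
    obtain ⟨hlen1, hbin1⟩ := (mem_combos 7 bits1).1 hmem1
    set c1 := fun u => (PySem.Dict.ofList (vs.zip (0 :: bits1))).getD u 0 with hc1
    have hanch1 : c1 v0 = 0 := by
      rw [hc1]
      apply getD_zipDict _ _ hnd
      rw [hvs]; exact List.mem_cons_self
    have hbinc1 : ∀ x ∈ vs, c1 x = 0 ∨ c1 x = 1 :=
      zipDict_binary vs bits1 hnd (by omega) hbin1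
    have hprc1 : q3PrC vs v0 (fun x => adj.getD x []) c1 :=
      ⟨hanch1, hbinc1, fun v hv u hu => (pb_iff adj vs bits1).1 hPb1 v hv u hu⟩
    cases hbfs : q3BfsA adj 8 [v0] (PySem.Dict.empty.insert v0 0) with
    | none => exact absurd hprc1 (loopnone hbfs c1)
    | some col' =>
      refine ⟨col', rfl, ?_⟩
      obtain ⟨hknd, -, -, hkvs, hv0k, hc0, hbin, hclosed, hforce⟩ := loopsome col' hbfs
      by_contra hsize
      have hklen : col'.keys.length = col'.size := by
        simp only [PySem.Dict.keys, List.length_map]; rfl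
      have hkle : col'.keys.length ≤ 8 := by
        have := (List.subperm_of_subset hknd hkvs).length_le
        omega
      -- there is a vertex outside the reached set
      have hw : ∃ w ∈ vs, w ∉ col'.keys := by
        by_contra hall
        have hall' : ∀ w ∈ vs, w ∈ col'.keys := by
          intro w hwv
          by_contra hwk
          exact hall ⟨w, hwv, hwk⟩
        have := (List.subperm_of_subset hnd hall').length_le
        omega
      obtain ⟨w, hwvs, hwK⟩ := hw
      have hforce1 : ∀ x ∈ vs, x ∈ col'.keys → c1 x = col'.getD x 0 := by
        intro x hx hxK
        exact hforce c1 hprc1 x hxK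
      set g := fun x => if x ∈ col'.keys then c1 x else 1 - c1 x with hg
      set bits2 := tl.map g with hbits2
      have hgbin : ∀ x ∈ vs, g x = 0 ∨ g x = 1 := by
        intro x hx
        rw [hg]
        rcases hbinc1 x hx with h | h <;> by_cases hxk : x ∈ col'.keys <;>
          simp [hxk, h]
      have hmem2 : bits2 ∈ q3Combos 7 := by
        rw [mem_combos]
        constructor
        · rw [hbits2, List.length_map]; exact htl
        · intro b hb
          rcases List.mem_map.1 hb with ⟨x, hx, rfl⟩
          exact hgbin x (by rw [hvs]; exact List.mem_cons_of_mem _ hx)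
      have hg0 : g v0 = 0 := by
        rw [hg]; simp only [hv0k, if_pos]
        exact hanch1
      have hcolD2 : ∀ x ∈ vs,
          (PySem.Dict.ofList (vs.zip (0 :: bits2))).getD x 0 = g x := by
        rw [hvs]
        rw [hvs] at hnd
        exact zipDict_getD_fun v0 tl hnd g hg0
      have hPb2 : q3Pb adj vs bits2 = true := by
        rw [pb_iff]
        intro v hv u hu
        have huvs := (hcl v u hu).2
        rw [hcolD2 v hv, hcolD2 u huvs]
        by_cases hvK : v ∈ col'.keys
        · have huK : u ∈ col'.keys := (hclosed v hvK (List.not_mem_nil) u hu).1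
          rw [hg]
          simp only [hvK, huK, if_pos]
          exact hprc1.2.2 v hv u hu
        · have huK : u ∉ col'.keys := by
            intro huK
            exact hvK (hclosed u huK (List.not_mem_nil) v (hsym v u hu)).1
          rw [hg]
          simp only [hvK, huK, if_false]
          have h1 := hprc1.2.2 v hv u hu
          have h2 := hbinc1 v hv
          have h3 := hbinc1 u huvs
          omega
      have heq : bits2 = bits1 := huniq bits2 hmem2 hPb2
      -- but they differ at w
      have hwtl : w ∈ tl := by
        rcases List.mem_cons.1 (hvs ▸ hwvs) with h | h
        · exact absurd (h ▸ hv0k) hwK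
        · exact h
      have hrec1 : tl.map c1 = bits1 := by
        have h := zipDict_map_tail v0 tl bits1 (by rw [← hvs]; exact hnd) (by omega)
        rw [hc1, hvs]
        exact h
      have : g w = c1 w := by
        have : tl.map g = tl.map c1 := by rw [← hbits2, heq, hrec1]
        exact List.map_inj_left.1 this w hwtl
      rw [hg] at this
      simp only [hwK, if_false] at this
      have := hbinc1 w hwvs
      omega

-- ===== VERDICT (by name: the statement is the Claim_ definition above) =====
theorem is_q3_spec : Claim_equal_is_q3 := by
  intro graph_edges vertices _ hpre
  obtain ⟨hvnd, hend, hlen2⟩ := hpre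
  unfold Spec_is_q3 is_q3 is_q3_alt
  by_cases h8 : vertices.length = 8
  case neg => rw [if_pos h8, if_pos h8]
  have hlen_ne : ¬¬(vertices.length = 8) := fun hc => hc h8
  rw [if_neg hlen_ne, if_neg hlen_ne]
  simp only []
  set verts := PySem.List.sorted vertices (fun x => x) false with hverts
  have hperm : verts.Perm vertices := PySem.List.sorted_perm vertices (fun x => x) false
  have hvl : verts.length = 8 := by rw [hperm.length_eq]; exact h8
  have hvnd' : verts.Nodup := hperm.nodup_iff.2 hvnd
  set p := fun e => PySem.Set.issubset e vertices with hp
  have hshape : ∀ e ∈ graph_edges, p e = true →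
      ∃ u v, e = [u, v] ∧ u ≠ v ∧ u ∈ vertices ∧ v ∈ vertices := by
    intro e he hpe
    rw [hp] at hpe
    have hsub : ∀ x ∈ e, x ∈ vertices := (PySem.Set.issubset_iff _ _).1 hpe
    have hlen : e.length = 2 := hlen2 h8 e he hsub
    match e, hlen with
    | [u, v], _ =>
      refine ⟨u, v, rfl, ?_, hsub u (by simp), hsub v (by simp)⟩
      have := hend _ he
      simp [List.nodup_cons] at this
      exact this
  have hstepA : graph_edges.foldl
      (fun (st : PySem.Dict Int (PySem.Set Int) × Int) e =>
        if p e then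
          match e with
          | [u, v] =>
            let d := st.1.insert u (PySem.Set.add (st.1.getD u []) v)
            (d.insert v (PySem.Set.add (d.getD v []) u), st.2 + 1)
          | _ => st
        else st) (PySem.Dict.empty, (0 : Int))
      = ((graph_edges.filter p).foldl q3AdjStep PySem.Dict.empty,
          0 + (((graph_edges.filter p).length : Nat) : Int)) := by
    rw [PySem.List.foldl_congr_mem _ _
      (fun (st : PySem.Dict Int (PySem.Set Int) × Int) e =>
        if p e then (q3AdjStep st.1 e, st.2 + 1) else st) _ ?_]
    · exact foldl_pair_split graph_edges p PySem.Dict.empty 0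
    · intro acc x hx
      by_cases hpx : p x
      · rcases hshape x hx hpx with ⟨u, v, rfl, -, -, -⟩
        simp only [if_pos hpx]
        rfl
      · simp only [if_neg hpx]
  rw [hstepA]
  dsimp only
  set flt := graph_edges.filter p with hflt
  set adjA := flt.foldl q3AdjStep PySem.Dict.empty with hadjA
  have hfltshape : ∀ e ∈ flt, ∃ u v, e = [u, v] ∧ u ≠ v ∧ u ∈ vertices ∧ v ∈ vertices := by
    intro e he
    rw [hflt, List.mem_filter] at he
    exact hshape e he.1 he.2
  rw [PySem.List.foldl_congr_mem flt _ q3AdjStep _ (by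
    intro acc x hx
    rcases hfltshape x hx with ⟨u, v, rfl, -, -, -⟩
    simp [PySem.List.pyGetD_ofNat', q3AdjStep])]
  set adj0 := verts.foldl (fun (d : PySem.Dict Int (PySem.Set Int)) v => d.insert v []) PySem.Dict.empty with hadj0
  have hpt : ∀ x, (flt.foldl q3AdjStep adj0).getD x [] = adjA.getD x [] := by
    rw [hadjA]
    apply foldl_adj_pointwise
    intro x
    rw [PySem.Dict.getD_empty, hadj0]
    exact adj0_getD verts PySem.Dict.empty (fun x => PySem.Dict.getD_empty _ _) x
  simp only [hpt]
  -- edge-count guard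
  by_cases hc12 : flt.length = 12
  case neg =>
    have hA : (0 : Int) + (flt.length : Int) ≠ 12 := by
      intro hc; apply hc12; omega
    rw [if_pos hA, if_pos hc12]
  have hA : ¬((0 : Int) + (flt.length : Int) ≠ 12) := by
    rw [hc12]; norm_num
  have hB : ¬(flt.length ≠ 12) := fun hc => hc hc12
  rw [if_neg hA, if_neg hB]
  -- degree guard
  have hdeg : (¬ (verts.all fun v => (adjA.getD v []).length == 3) = true)
      ↔ ((verts.any fun v => decide ¬((adjA.getD v []).length = 3)) = true) := by
    simp [List.all_eq_true, List.any_eq_true]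
  by_cases hd : (verts.all fun v => (adjA.getD v []).length == 3) = true
  case neg => rw [if_pos hd, if_pos (hdeg.1 hd)]
  have hdA : ¬¬((verts.all fun v => (adjA.getD v []).length == 3) = true) := fun hc => hc hd
  have hdB : ¬((verts.any fun v => decide ¬((adjA.getD v []).length = 3)) = true) :=
    fun hc => (hdeg.2 hc) hd
  rw [if_neg hdA, if_neg hdB]
  -- symmetry / closedness of the adjacency
  have hsymfull := adj_fold_sym vertices flt hfltshape PySem.Dict.empty
    (by intro x y hy; rw [PySem.Dict.getD_empty] at hy; cases hy)
  have hsym : ∀ x y, y ∈ adjA.getD x [] → x ∈ adjA.getD y [] :=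
    fun x y hy => (hsymfull x y hy).1
  have hcl : ∀ x y, y ∈ adjA.getD x [] → x ∈ verts ∧ y ∈ verts := by
    intro x y hy
    obtain ⟨-, hx, hyv⟩ := hsymfull x y hy
    exact ⟨hperm.mem_iff.2 hx, hperm.mem_iff.2 hyv⟩
  -- destructure verts
  obtain ⟨a, tl, hv⟩ : ∃ a tl, verts = a :: tl := by
    cases hvv : verts with
    | nil => rw [hvv] at hvl; simp at hvl
    | cons a tl => exact ⟨a, tl, rfl⟩
  have hv0 : PySem.List.pyGetD verts 0 0 = a := by
    rw [hv, PySem.List.pyGetD_ofNat']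
    rfl
  rw [hv0, h8]
  -- B's count
  rw [range_foldl_combos 7]
  have hpbfun : (fun (bits : List Int) =>
      (verts.all fun v => ((adjA.getD v []).all fun u =>
        decide ¬((PySem.Dict.ofList (verts.zip (0 :: bits))).getD u 0
          = (PySem.Dict.ofList (verts.zip (0 :: bits))).getD v 0))))
      = q3Pb adjA verts := by
    funext bits
    simp only [q3Pb]
  have hcount := PySem.List.foldl_count_if (q3Pb adjA verts) (q3Combos 7) 0
  rw [show ((fun g (bits : List Int) =>
      if (verts.all fun v => ((adjA.getD v []).all fun u =>
        decide ¬((PySem.Dict.ofList (verts.zip (0 :: bits))).getD u 0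
          = (PySem.Dict.ofList (verts.zip (0 :: bits))).getD v 0))) = true
      then g + 1 else g)) = (fun (g : Int) bits =>
      if q3Pb adjA verts bits = true then g + 1 else g) by rw [← hpbfun]]
  rw [hcount]
  have hcore := q3core adjA verts a tl hv hvnd' hvl hsym hcl
  by_cases hcnt : (q3Combos 7).countP (q3Pb adjA verts) = 1
  · obtain ⟨col', hbfs, hsize⟩ := hcore.2 hcnt
    rw [hbfs]
    simp only []
    rw [if_neg (fun hc => hc hsize), if_neg (by rw [hcnt]; norm_num)]
  · rw [if_pos (by
      intro hc
      apply hcnt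
      omega)]
    cases hbfs : q3BfsA adjA 8 [a] (PySem.Dict.empty.insert a 0) with
    | none => rfl
    | some col' =>
      simp only []
      rw [if_pos (by
        intro hsz
        exact hcnt (hcore.1 ⟨col', hbfs, hsz⟩))]
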